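-- pv_equiv track=rewrite | github.com/suchT01/Python-Exercises | 13.EJERCICIOS/22.py | cooking_time
-- ===== SOURCE A (Python) =====
-- import math
--
-- def cooking_time(eggs):
--     time=0
--     if eggs>8:
--         op=math.ceil(eggs/8)
--         for i in range(op):
--             time+=5
--         return time
--     elif 0<eggs<8:
--         return 5
--     else:
--         return 0
-- ===== SOURCE B (Python) =====
-- import math
--
-- def cooking_time(eggs):
--     # closed form: ceil(eggs/8) batches of 5 minutes; fixes A's eggs==8 -> 0 quirk
--     if eggs <= 0:
--         return 0
--     return 5 * -(-eggs // 8)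
-- ===== Notes on version B (the rewrite author's own statement) =====
-- stated objective: simpler
-- what changed: Replaced the per-batch loop and three-way branch chain with a single closed-form ceiling-division formula (five minutes per batch of eight) for positive egg counts.
-- intended difference: For exactly eight eggs, A's branches (strictly greater-than and strictly less-than) both exclude that count so A returns no cooking time at all, while B returns five minutes, the intended time for one full batch. — e.g. on cooking_time(8): A returns 0, B returns 5
import Mathlib
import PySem

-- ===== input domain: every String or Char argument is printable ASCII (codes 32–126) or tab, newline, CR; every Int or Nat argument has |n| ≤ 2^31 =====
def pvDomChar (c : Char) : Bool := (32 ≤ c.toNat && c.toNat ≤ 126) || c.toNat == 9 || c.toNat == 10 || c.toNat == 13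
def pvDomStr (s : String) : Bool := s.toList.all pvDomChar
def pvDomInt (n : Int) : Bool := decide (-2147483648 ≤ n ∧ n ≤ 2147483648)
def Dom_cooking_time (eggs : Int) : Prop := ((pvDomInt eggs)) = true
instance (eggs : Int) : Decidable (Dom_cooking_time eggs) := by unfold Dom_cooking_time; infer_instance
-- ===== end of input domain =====

-- B replaces A's per-batch accumulation loop and branch chain with the closed form
-- 5 * ceil(eggs/8) for positive eggs (simpler; and fixes A's value at eggs = 8, stated in D_).


-- ===== PORT A =====
-- math.ceil(eggs/8) is ported as -((-eggs) // 8); exact on Dom (|eggs| ≤ 2^31, so the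
-- float division eggs/8 is exact and its ceiling equals the integer ceiling).
def cooking_time (eggs : Int) : Int :=
  let time : Int := 0
  if eggs > 8 then
    let op : Int := -(PySem.Int.floordiv (-eggs) 8)
    (PySem.List.pyRange 0 op 1).foldl (fun t _ => t + 5) time
  else if 0 < eggs ∧ eggs < 8 then
    5
  else
    0

-- ===== PORT B =====
def cooking_time_alt (eggs : Int) : Int :=
  if eggs ≤ 0 then 0
  else 5 * (-(PySem.Int.floordiv (-eggs) 8))

-- ===== PRECONDITION & SPEC =====
-- For exactly eight eggs, A's branches (strictly greater-than and strictly less-than) both exclude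
-- that count so A returns no cooking time at all, while B returns five minutes, the intended time
-- for one full batch.
def D_cooking_time (eggs : Int) : Prop := eggs = 8
instance (eggs : Int) : Decidable (D_cooking_time eggs) := by unfold D_cooking_time; infer_instance
def Spec_cooking_time (eggs : Int) (out : Int) : Prop := ¬ D_cooking_time eggs → out = cooking_time_alt eggs
instance (eggs : Int) (out : Int) : Decidable (Spec_cooking_time eggs out) := by unfold Spec_cooking_time; infer_instance
def pvDiffWitness_cooking_time : Int := 8
def pvDiffWitnessOut_cooking_time : Int × Int := (0, 5)

-- ===== CLAIM (what is proved, stated in full; the proofs are below) =====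
def Claim_unchanged_cooking_time : Prop := ∀ (eggs : Int), Dom_cooking_time eggs → Spec_cooking_time eggs (cooking_time eggs)
def Claim_changed_cooking_time : Prop := Dom_cooking_time (pvDiffWitness_cooking_time) ∧ D_cooking_time (pvDiffWitness_cooking_time) ∧ cooking_time (pvDiffWitness_cooking_time) = pvDiffWitnessOut_cooking_time.1 ∧ cooking_time_alt (pvDiffWitness_cooking_time) = pvDiffWitnessOut_cooking_time.2 ∧ pvDiffWitnessOut_cooking_time.1 ≠ pvDiffWitnessOut_cooking_time.2
def Claim_exact_cooking_time : Prop := ∀ (eggs : Int), Dom_cooking_time eggs → D_cooking_time eggs → cooking_time eggs ≠ cooking_time_alt eggs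

-- ===== LEMMAS AND PROOFS =====

-- A's loop adds 5 once per element of the range.
theorem foldl_add_five (l : List Int) (acc : Int) :
    l.foldl (fun t (_ : Int) => t + 5) acc = acc + 5 * l.length := by
  induction l generalizing acc with
  | nil => simp
  | cons x xs ih => simp [List.foldl, ih]; ring

-- ===== VERDICT (by name: the statement is the Claim_ definition above) =====
theorem cooking_time_spec : Claim_unchanged_cooking_time := by
  intro eggs _ hD
  have h8 : eggs ≠ 8 := hD
  unfold cooking_time cooking_time_alt
  by_cases hgt : eggs > 8
  · -- eggs > 8: loop sums 5 * op; op = ceil(eggs/8) ≥ 2 > 0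
    have hq := PySem.Int.floordiv_mul_add_mod (-eggs) 8
    have hr0 := PySem.Int.mod_nonneg (-eggs) (b:=8) (by omega)
    have hr1 := PySem.Int.mod_lt (-eggs) (b:=8) (by omega)
    set q : Int := PySem.Int.floordiv (-eggs) 8 with hqdef
    have hqle : q ≤ -2 := by omega
    simp only [hgt, if_pos, foldl_add_five, PySem.List.length_pyRange_one]
    rw [if_neg (by omega : ¬ eggs ≤ 0)]
    have h : ((-q - 0).toNat : Int) = -q := by omega
    rw [h]; ring
  · by_cases hlt : 0 < eggs ∧ eggs < 8
    · -- 1 ≤ eggs ≤ 7 : ceil(eggs/8) = 1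
      have hq := PySem.Int.floordiv_mul_add_mod (-eggs) 8
      have hr0 := PySem.Int.mod_nonneg (-eggs) (b:=8) (by omega)
      have hr1 := PySem.Int.mod_lt (-eggs) (b:=8) (by omega)
      have hq1 : PySem.Int.floordiv (-eggs) 8 = -1 := by omega
      rw [if_neg hgt, if_pos hlt, if_neg (by omega : ¬ eggs ≤ 0), hq1]
      norm_num
    · -- eggs ≤ 0 (eggs = 8 excluded by D_): both return 0
      have : eggs ≤ 0 := by omega
      simp [hgt, hlt, this]

theorem cooking_time_changed : Claim_changed_cooking_time := by
  unfold Claim_changed_cooking_time; decide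

theorem cooking_time_tight : Claim_exact_cooking_time := by
  intro eggs _ hD
  subst hD
  decide
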